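-- pv_equiv track=rewrite | github.com/zekusmaximus/Narramorph | standardize_variations.py | determine_awareness_range
-- ===== SOURCE A (Python) =====
-- def determine_awareness_range(awareness_level):
--     """Determine awareness range string."""
--     ranges = [
--         (21, 30), (31, 40), (41, 50), (51, 60),
--         (61, 70), (71, 80), (81, 90), (91, 100)
--     ]
--     for low, high in ranges:
--         if low <= awareness_level <= high:
--             return f'"{low}-{high}"'
--     return '"21-30"'  # default
-- ===== SOURCE B (Python) =====
-- def determine_awareness_range(awareness_level):
--     """Determine awareness range string (arithmetic bucket, no table)."""
--     if 21 <= awareness_level <= 100: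
--         low = 10 * ((awareness_level - 1) // 10) + 1
--         return f'"{low}-{low + 9}"'
--     return '"21-30"'
-- ===== Notes on version B (the rewrite author's own statement) =====
-- stated objective: simpler
-- what changed: Replaced the table of eight (low, high) pairs and the linear scan by a direct arithmetic computation of the decade bucket via floor division.
import Mathlib
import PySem

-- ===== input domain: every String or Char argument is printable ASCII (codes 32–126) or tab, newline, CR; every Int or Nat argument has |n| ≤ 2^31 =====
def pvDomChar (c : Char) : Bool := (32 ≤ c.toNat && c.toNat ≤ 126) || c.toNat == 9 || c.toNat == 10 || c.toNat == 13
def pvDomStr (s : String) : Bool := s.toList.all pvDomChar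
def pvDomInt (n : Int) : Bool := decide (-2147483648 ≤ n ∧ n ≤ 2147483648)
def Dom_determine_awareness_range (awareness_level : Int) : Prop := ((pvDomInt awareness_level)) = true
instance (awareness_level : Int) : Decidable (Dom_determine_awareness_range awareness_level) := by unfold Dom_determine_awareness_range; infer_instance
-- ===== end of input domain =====

-- B replaces A's eight-entry range table and linear scan by arithmetic bucket computation (objective: simpler).
-- ===== PORT A =====
-- the literal table from A
def darRanges : List (Int × Int) :=
  [(21, 30), (31, 40), (41, 50), (51, 60), (61, 70), (71, 80), (81, 90), (91, 100)]

-- the for-loop over the table with early return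
def darLoop (x : Int) : List (Int × Int) → String
  | [] => "\"21-30\""  -- default
  | (low, high) :: rest =>
      if low ≤ x ∧ x ≤ high then
        "\"" ++ PySem.Int.toStr low ++ "-" ++ PySem.Int.toStr high ++ "\""
      else darLoop x rest

def determine_awareness_range (awareness_level : Int) : String :=
  darLoop awareness_level darRanges

-- ===== PORT B =====
def determine_awareness_range_alt (awareness_level : Int) : String :=
  if 21 ≤ awareness_level ∧ awareness_level ≤ 100 then
    let low := 10 * (PySem.Int.floordiv (awareness_level - 1) 10) + 1
    "\"" ++ PySem.Int.toStr low ++ "-" ++ PySem.Int.toStr (low + 9) ++ "\""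
  else "\"21-30\""

-- ===== PRECONDITION & SPEC =====
def Spec_determine_awareness_range (awareness_level : Int) (out : String) : Prop := out = determine_awareness_range_alt awareness_level
instance (awareness_level : Int) (out : String) : Decidable (Spec_determine_awareness_range awareness_level out) := by unfold Spec_determine_awareness_range; infer_instance

-- ===== CLAIM =====
def Claim_equal_determine_awareness_range : Prop := ∀ (awareness_level : Int), Dom_determine_awareness_range awareness_level → Spec_determine_awareness_range awareness_level (determine_awareness_range awareness_level)

-- ===== LEMMAS AND PROOFS =====

-- ===== VERDICT =====
theorem determine_awareness_range_spec : Claim_equal_determine_awareness_range := by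
  intro x _
  unfold Spec_determine_awareness_range determine_awareness_range determine_awareness_range_alt darRanges darLoop
  by_cases h : 21 ≤ x ∧ x ≤ 100
  · rw [if_pos h]
    obtain ⟨h1, h2⟩ := h
    interval_cases x <;> decide
  · rw [if_neg h]
    simp only [darLoop]
    repeat rw [if_neg (by omega)]
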